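-- pv_equiv track=rewrite | github.com/rabeeh003/data-structures | DS2/insertionSort.py | ISAoud
-- ===== SOURCE A (Python) =====
-- def ISAoud(arr):
--     for i in range(1,len(arr)):
--         current = arr[i]
--         j = i - 1
--         while j >=0 and current < arr[j]:
--             arr[j+1] = arr[j]
--             j -= 1
--         arr[j+1] = current
--     ret = []
--     for i in arr:
--         if i % 2 != 0:
--             ret.append(i)
--     return ret
-- ===== SOURCE B (Python) =====
-- def ISAoud(arr):
--     # merge sort instead of insertion sort; mutates arr in place like A (arr[:] = ...)
--     def msort(xs):
--         if len(xs) <= 1: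
--             return xs[:]
--         mid = len(xs) // 2
--         left = msort(xs[:mid])
--         right = msort(xs[mid:])
--         merged = []
--         i = j = 0
--         while i < len(left) and j < len(right):
--             if left[i] < right[j]:
--                 merged.append(left[i])
--                 i += 1
--             else:
--                 merged.append(right[j])
--                 j += 1
--         merged.extend(left[i:])
--         merged.extend(right[j:])
--         return merged
--     arr[:] = msort(arr)
--     return [x for x in arr if x % 2 != 0]
-- ===== Notes on version B (the rewrite author's own statement) =====
-- stated objective: faster
-- what changed: Replaces the O(n^2) in-place insertion sort with a recursive merge sort (split, sort halves, two-pointer merge), written back via arr[:] so the caller's list is mutated in place exactly as A leaves it; the odd-element selection becomes a comprehension.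
import Mathlib
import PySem

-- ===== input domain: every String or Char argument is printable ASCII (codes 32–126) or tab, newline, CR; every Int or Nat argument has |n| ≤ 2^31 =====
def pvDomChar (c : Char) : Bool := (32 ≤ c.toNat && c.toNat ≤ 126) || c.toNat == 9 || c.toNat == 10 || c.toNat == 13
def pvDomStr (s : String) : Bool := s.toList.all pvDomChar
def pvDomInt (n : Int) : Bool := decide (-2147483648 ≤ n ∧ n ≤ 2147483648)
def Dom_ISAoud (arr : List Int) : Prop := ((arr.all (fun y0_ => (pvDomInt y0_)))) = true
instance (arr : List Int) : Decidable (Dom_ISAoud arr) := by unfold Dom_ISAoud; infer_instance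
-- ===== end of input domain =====

-- B replaces A's O(n^2) insertion sort by a recursive merge sort; both A and B mutate the
-- argument list in place in Python (A sorts it by assignment, B via arr[:] = ...), and the
-- equivalence proved here is about the RETURN value (the odd elements of the sorted list).

-- ===== PORT A =====
-- the inner 'while j >= 0 and current < arr[j]' shifting loop of A
def pvShift (arr : List Int) (current : Int) (j : Int) : List Int :=
  if h : 0 ≤ j ∧ current < (PySem.List.pyGet? arr j).getD 0 then
    pvShift (arr.set (j + 1).toNat ((PySem.List.pyGet? arr j).getD 0)) current (j - 1)
  else
    arr.set (j + 1).toNat current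
termination_by (j + 1).toNat
decreasing_by
  have := h.1; omega

def ISAoud (arr : List Int) : List Int :=
  let sorted := (PySem.List.pyRange 1 (arr.length : Int) 1).foldl
    (fun a i => pvShift a ((PySem.List.pyGet? a i).getD 0) (i - 1)) arr
  sorted.foldl (fun ret i => if PySem.Int.mod i 2 ≠ 0 then ret ++ [i] else ret) []

-- ===== PORT B =====
-- the two-pointer merge loop of B, as the obvious structural recursion
def pvMerge : List Int → List Int → List Int
  | [], r => r
  | l, [] => l
  | a :: l, b :: r => if a < b then a :: pvMerge l (b :: r) else b :: pvMerge (a :: l) r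

def pvMsort (xs : List Int) : List Int :=
  if xs.length ≤ 1 then xs
  else
    let mid := xs.length / 2
    pvMerge (pvMsort (xs.take mid)) (pvMsort (xs.drop mid))
termination_by xs.length
decreasing_by
  · simp only [List.length_take]; omega
  · simp only [List.length_drop]; omega

def ISAoud_alt (arr : List Int) : List Int :=
  (pvMsort arr).filter (fun x => decide (PySem.Int.mod x 2 ≠ 0))

-- ===== PRECONDITION & SPEC =====
def Spec_ISAoud (arr : List Int) (out : List Int) : Prop := out = ISAoud_alt arr
instance (arr : List Int) (out : List Int) : Decidable (Spec_ISAoud arr out) := by unfold Spec_ISAoud; infer_instance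

-- ===== CLAIM (what is proved, stated in full; the proofs are below) =====
def Claim_equal_ISAoud : Prop := ∀ (arr : List Int), Dom_ISAoud arr → Spec_ISAoud arr (ISAoud arr)

-- ===== LEMMAS AND PROOFS =====

-- insertion of c into a list, placing c AFTER equal elements (exactly A's '<' test)
def pvIns (c : Int) : List Int → List Int
  | [] => [c]
  | h :: t => if c < h then c :: h :: t else h :: pvIns c t

theorem pvIns_perm (c : Int) (l : List Int) : List.Perm (pvIns c l) (c :: l) := by
  induction l with
  | nil => simp [pvIns]
  | cons h t ih =>
    simp only [pvIns]
    split
    · exact List.Perm.refl _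
    · exact ((ih.cons h).trans (List.Perm.swap c h t))

theorem pvIns_length (c : Int) (l : List Int) : (pvIns c l).length = l.length + 1 :=
  (pvIns_perm c l).length_eq

theorem pvIns_sorted (c : Int) (l : List Int) (hs : l.Sorted (· ≤ ·)) :
    (pvIns c l).Sorted (· ≤ ·) := by
  induction l with
  | nil => simp [pvIns, List.sorted_singleton]
  | cons h t ih =>
    rw [List.sorted_cons] at hs
    simp only [pvIns]
    split
    · rename_i hc
      rw [List.sorted_cons]
      refine ⟨?_, List.sorted_cons.2 hs⟩
      intro b hb
      rcases List.mem_cons.1 hb with rfl | hb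
      · omega
      · exact le_of_lt (lt_of_lt_of_le hc (hs.1 b hb))
    · rename_i hc
      rw [List.sorted_cons]
      refine ⟨?_, ih hs.2⟩
      intro b hb
      rcases List.mem_cons.1 ((pvIns_perm c t).mem_iff.1 hb) with rfl | hb
      · omega
      · exact hs.1 b hb

theorem pvIns_append_lt (c a : Int) (l : List Int) (h : c < a) :
    pvIns c (l ++ [a]) = pvIns c l ++ [a] := by
  induction l with
  | nil => simp [pvIns, h]
  | cons x t ih =>
    simp only [List.cons_append, pvIns]
    split <;> simp [ih]

theorem pvIns_append_ge (c : Int) (l : List Int) (h : ∀ x ∈ l, ¬ c < x) :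
    pvIns c l = l ++ [c] := by
  induction l with
  | nil => simp [pvIns]
  | cons x t ih =>
    simp only [pvIns]
    rw [if_neg (h x (by simp)), ih (fun y hy => h y (by simp [hy]))]
    simp

-- characterisation of the inner shifting loop on a sorted prefix
theorem pvShift_eq (n : Nat) : ∀ (l : List Int) (c : Int), n < l.length →
    (l.take n).Sorted (· ≤ ·) →
    pvShift l c ((n : Int) - 1) = pvIns c (l.take n) ++ l.drop (n + 1) := by
  induction n with
  | zero =>
    intro l c hlen _
    rw [pvShift, dif_neg (by omega)]
    match l, hlen with
    | h :: t, _ => simp [pvIns]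
  | succ n ih =>
    intro l c hlen hs
    have hn : n < l.length := by omega
    have hj : ((n + 1 : Nat) : Int) - 1 = ((n : Nat) : Int) := by push_cast; ring
    have hget : (PySem.List.pyGet? l ((n : Nat) : Int)).getD 0 = l[n] := by
      simp [PySem.List.pyGet?_natCast, List.getElem?_eq_getElem hn]
    have htake : l.take (n + 1) = l.take n ++ [l[n]] := by
      rw [List.take_succ]
      simp [List.getElem?_eq_getElem hn]
    have hsn : (l.take n).Sorted (· ≤ ·) := by
      have h0 : l.take n = (l.take (n + 1)).take n := by simp [List.take_take]
      rw [h0]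
      exact hs.sublist (List.take_sublist _ _)
    have hall : ∀ x ∈ l.take n, x ≤ l[n] := by
      intro x hx
      rw [htake] at hs
      exact (List.pairwise_append.1 hs).2.2 x hx _ (by simp)
    have hsplit : ∀ x : Int, l.set (n + 1) x = l.take (n + 1) ++ x :: l.drop (n + 2) := by
      intro x
      rw [List.set_eq_take_append_cons_drop, if_pos hlen]
    rw [hj, pvShift]
    by_cases hc : c < l[n]
    · rw [dif_pos ⟨Int.natCast_nonneg n, by rw [hget]; exact hc⟩]
      rw [hget]
      have ht1 : (((n : Nat) : Int) + 1).toNat = n + 1 := by omega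
      rw [ht1]
      set l' := l.set (n + 1) l[n] with hl'
      have hlsplit : l' = l.take (n + 1) ++ l[n] :: l.drop (n + 2) := hsplit l[n]
      have hlen' : n < l'.length := by simp [hl', hn]
      have htk' : l'.take n = l.take n := by
        rw [hlsplit, List.take_append_of_le_length (by simp; omega), List.take_take]
        congr 1
        omega
      have hdr' : l'.drop (n + 1) = l[n] :: l.drop (n + 2) := by
        rw [hlsplit, List.drop_append_of_le_length (by simp; omega)]
        simp
      have := ih l' c hlen' (htk' ▸ hsn)
      rw [this, htk', hdr', htake, pvIns_append_lt c _ _ hc]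
      simp
    · rw [dif_neg (by rw [hget]; exact fun hcon => hc hcon.2)]
      have ht1 : (((n : Nat) : Int) + 1).toNat = n + 1 := by omega
      rw [ht1, hsplit c]
      rw [htake, pvIns_append_ge]
      · simp
      · intro x hx
        rcases List.mem_append.1 hx with hx | hx
        · have := hall x hx; omega
        · simp at hx; omega

-- the outer for-loop: sorts a step by step
theorem pvFold_sorted (arr : List Int) : ∀ (k : Nat) (i : Nat) (a : List Int),
    arr.length ≤ i + k → a.length = arr.length → (a.take i).Sorted (· ≤ ·) → List.Perm a arr →
    List.Perm ((PySem.List.pyRange (i : Int) (arr.length : Int) 1).foldl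
      (fun a j => pvShift a ((PySem.List.pyGet? a j).getD 0) (j - 1)) a) arr ∧
    ((PySem.List.pyRange (i : Int) (arr.length : Int) 1).foldl
      (fun a j => pvShift a ((PySem.List.pyGet? a j).getD 0) (j - 1)) a).Sorted (· ≤ ·) := by
  intro k
  induction k with
  | zero =>
    intro i a hk hlen hs hperm
    rw [PySem.List.pyRange_one_eq_nil (by omega)]
    refine ⟨hperm, ?_⟩
    simpa [List.take_of_length_le (by omega : a.length ≤ i)] using hs
  | succ k ih =>
    intro i a hk hlen hs hperm
    by_cases hi : arr.length ≤ i
    · rw [PySem.List.pyRange_one_eq_nil (by omega)]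
      refine ⟨hperm, ?_⟩
      simpa [List.take_of_length_le (by omega : a.length ≤ i)] using hs
    · rw [not_le] at hi
      rw [PySem.List.pyRange_one_cons (by omega)]
      rw [List.foldl_cons]
      have hia : i < a.length := by omega
      have hget : (PySem.List.pyGet? a (i : Int)).getD 0 = a[i] := by
        simp [PySem.List.pyGet?_natCast, List.getElem?_eq_getElem hia]
      rw [hget]
      rw [pvShift_eq i a a[i] hia hs]
      set a' := pvIns a[i] (a.take i) ++ a.drop (i + 1) with ha'
      have hperm' : List.Perm a' a := by
        have h1 : List.Perm a' (a[i] :: (a.take i ++ a.drop (i + 1))) := by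
          rw [ha']
          simpa using (pvIns_perm a[i] (a.take i)).append_right (a.drop (i + 1))
        have h2 : List.Perm (a[i] :: (a.take i ++ a.drop (i + 1)))
            (a.take i ++ a[i] :: a.drop (i + 1)) := List.perm_middle.symm
        have h3 : a.take i ++ a[i] :: a.drop (i + 1) = a := by
          conv_rhs => rw [← List.take_append_drop i a]
          rw [List.getElem_cons_drop]
        exact h3 ▸ (h1.trans h2)
      have hlen' : a'.length = arr.length := by rw [hperm'.length_eq, hlen]
      have htk' : a'.take (i + 1) = pvIns a[i] (a.take i) := by
        rw [ha', List.take_append_of_le_length]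
        · rw [List.take_of_length_le]
          rw [pvIns_length, List.length_take]
          omega
        · rw [pvIns_length, List.length_take]; omega
      have hs' : (a'.take (i + 1)).Sorted (· ≤ ·) := by
        rw [htk']; exact pvIns_sorted _ _ hs
      have := ih (i + 1) a' (by omega) hlen' hs' (hperm'.trans hperm)
      push_cast at this ⊢
      exact this

theorem pvMerge_perm (l r : List Int) : List.Perm (pvMerge l r) (l ++ r) := by
  induction l, r using pvMerge.induct with
  | case1 r => simp [pvMerge]
  | case2 l h => simp [pvMerge]
  | case3 a l b r hab ih =>
    rw [pvMerge, if_pos hab]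
    exact (ih.cons a)
  | case4 a l b r hab ih =>
    rw [pvMerge, if_neg hab]
    refine (ih.cons b).trans ?_
    have : List.Perm (b :: (a :: l ++ r)) ((a :: l) ++ b :: r) := List.perm_middle.symm
    simpa using this

theorem pvMerge_sorted (l r : List Int) (hl : l.Sorted (· ≤ ·)) (hr : r.Sorted (· ≤ ·)) :
    (pvMerge l r).Sorted (· ≤ ·) := by
  induction l, r using pvMerge.induct with
  | case1 r => simpa [pvMerge] using hr
  | case2 l h => simpa [pvMerge] using hl
  | case3 a l b r hab ih =>
    rw [pvMerge, if_pos hab]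
    rw [List.sorted_cons] at hl ⊢
    refine ⟨?_, ih hl.2 hr⟩
    intro x hx
    have := (pvMerge_perm l (b :: r)).mem_iff.1 hx
    rcases List.mem_append.1 this with h1 | h2
    · exact hl.1 x h1
    · rcases List.mem_cons.1 h2 with rfl | h2
      · omega
      · have := (List.sorted_cons.1 hr).1 x h2
        omega
  | case4 a l b r hab ih =>
    rw [pvMerge, if_neg hab]
    rw [List.sorted_cons] at hr ⊢
    refine ⟨?_, ih hl hr.2⟩
    intro x hx
    have := (pvMerge_perm (a :: l) r).mem_iff.1 hx
    rcases List.mem_append.1 this with h1 | h2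
    · rcases List.mem_cons.1 h1 with rfl | h1
      · omega
      · have := (List.sorted_cons.1 hl).1 x h1
        omega
    · exact hr.1 x h2

theorem pvMsort_perm (xs : List Int) : List.Perm (pvMsort xs) xs := by
  induction xs using pvMsort.induct with
  | case1 xs h => rw [pvMsort, if_pos h]
  | case2 xs h mid ih1 ih2 =>
    rw [pvMsort, if_neg h]
    refine (pvMerge_perm _ _).trans ?_
    refine (ih1.append ih2).trans ?_
    rw [List.take_append_drop]

theorem pvMsort_sorted (xs : List Int) : (pvMsort xs).Sorted (· ≤ ·) := by
  induction xs using pvMsort.induct with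
  | case1 xs h =>
    rw [pvMsort, if_pos h]
    match xs, h with
    | [], _ => exact List.sorted_nil
    | [a], _ => exact List.pairwise_singleton _ a
  | case2 xs h mid ih1 ih2 =>
    rw [pvMsort, if_neg h]
    exact pvMerge_sorted _ _ ih1 ih2

-- ===== VERDICT (by name: the statement is the Claim_ definition above) =====
theorem ISAoud_spec : Claim_equal_ISAoud := by
  intro arr _
  unfold Spec_ISAoud ISAoud ISAoud_alt
  have hfold := pvFold_sorted arr arr.length 1 arr (by omega) rfl
    (by
      match arr with
      | [] => exact List.sorted_nil
      | a :: t => exact List.pairwise_singleton _ a)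
    (List.Perm.refl arr)
  set s := (PySem.List.pyRange (1 : Int) (arr.length : Int) 1).foldl
    (fun a j => pvShift a ((PySem.List.pyGet? a j).getD 0) (j - 1)) arr with hsdef
  have hcast : ((1 : Nat) : Int) = (1 : Int) := by norm_num
  rw [hcast] at hfold
  have heq : s = pvMsort arr := by
    exact List.Perm.eq_of_pairwise' hfold.2 (pvMsort_sorted arr)
      (hfold.1.trans (pvMsort_perm arr).symm)
  rw [PySem.List.foldl_append_ite_eq_filter]
  rw [heq]
  simp
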